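-- pv_equiv track=rewrite | github.com/jacksonkonkin/onc-ai-assistant | src/database_search/advanced_data_downloader.py | _extract_time_range
-- ===== SOURCE A (Python) =====
-- from typing import Dict, Any, List, Optional, Union
--
-- def _extract_time_range(files: List[Dict]) -> Dict[str, str]:
--     """Extract time range from archived files"""
--     if not files:
--         return {'earliest': None, 'latest': None}
--
--     timestamps = []
--     for file in files:
--         if 'dateFrom' in file:
--             timestamps.append(file['dateFrom'])
--         if 'dateTo' in file:
--             timestamps.append(file['dateTo'])
--
--     if timestamps:
--         return {
--             'earliest': min(timestamps),
--             'latest': max(timestamps)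
--         }
--     return {'earliest': None, 'latest': None}
-- ===== SOURCE B (Python) =====
-- def _extract_time_range(files):
--     """Extract time range from archived files (single streaming pass)."""
--     earliest = None
--     latest = None
--     for file in files:
--         for key in ('dateFrom', 'dateTo'):
--             if key in file:
--                 v = file[key]
--                 if earliest is None:
--                     earliest = latest = v
--                 else:
--                     if v < earliest:
--                         earliest = v
--                     if v > latest:
--                         latest = v
--     return {'earliest': earliest, 'latest': latest}
-- ===== Notes on version B (the rewrite author's own statement) =====
-- stated objective: simpler
-- what changed: Replaces the collect-into-a-list-then-min()/max() structure with a single streaming pass keeping running earliest/latest accumulators, dropping the intermediate timestamps list and the empty-list special cases.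
import Mathlib
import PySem

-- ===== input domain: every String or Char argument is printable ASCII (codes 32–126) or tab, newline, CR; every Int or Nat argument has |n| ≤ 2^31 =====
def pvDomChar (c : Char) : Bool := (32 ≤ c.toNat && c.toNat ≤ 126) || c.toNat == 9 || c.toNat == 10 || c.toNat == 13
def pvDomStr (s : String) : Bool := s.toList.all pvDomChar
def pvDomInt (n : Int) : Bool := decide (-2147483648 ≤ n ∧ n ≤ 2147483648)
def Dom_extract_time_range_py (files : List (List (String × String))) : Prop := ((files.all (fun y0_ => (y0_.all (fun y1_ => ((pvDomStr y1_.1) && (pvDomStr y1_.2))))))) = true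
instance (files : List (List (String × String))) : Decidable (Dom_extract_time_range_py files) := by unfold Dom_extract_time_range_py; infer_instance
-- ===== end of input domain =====

-- B replaces A's collect-then-min/max structure with a single streaming pass keeping
-- running earliest/latest accumulators (same cost; simpler: no intermediate list).


-- ===== PORT A =====
-- 'k in file' / 'file[k]' on the assoc-list dict: first-match lookup
def pvLookup (file : List (String × String)) (k : String) : Option String :=
  (file.find? (fun p => p.1 == k)).map Prod.snd

def extract_time_range_py (files : List (List (String × String))) : List (String × Option String) :=
  if files = [] then [("earliest", none), ("latest", none)]
  else
    let timestamps := files.foldl (fun ts file =>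
      let ts := match pvLookup file "dateFrom" with
        | some v => ts ++ [v]
        | none => ts
      match pvLookup file "dateTo" with
        | some v => ts ++ [v]
        | none => ts) []
    if timestamps ≠ [] then
      [("earliest", PySem.List.min? timestamps (fun x => x)),
       ("latest", PySem.List.max? timestamps (fun x => x))]
    else [("earliest", none), ("latest", none)]

-- ===== PORT B =====
-- Source B's inner body: update the (earliest, latest) accumulators with one value v
def pvUpd (acc : Option String × Option String) (v : String) : Option String × Option String :=
  match acc with
  | (none, _) => (some v, some v)
  | (some e, l) =>
      (if v < e then some v else some e,
       match l with
       | some l0 => if v > l0 then some v else some l0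
       | none => some v)

-- Source B's per-file body: the inner loop over ('dateFrom', 'dateTo')
def pvStep (acc : Option String × Option String) (file : List (String × String)) :
    Option String × Option String :=
  let acc := match pvLookup file "dateFrom" with
    | some v => pvUpd acc v
    | none => acc
  match pvLookup file "dateTo" with
    | some v => pvUpd acc v
    | none => acc

def extract_time_range_py_alt (files : List (List (String × String))) : List (String × Option String) :=
  let acc := files.foldl pvStep (none, none)
  [("earliest", acc.1), ("latest", acc.2)]

-- ===== PRECONDITION & SPEC =====
def Spec_extract_time_range_py (files : List (List (String × String))) (out : List (String × Option String)) : Prop := out = extract_time_range_py_alt files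
instance (files : List (List (String × String))) (out : List (String × Option String)) : Decidable (Spec_extract_time_range_py files out) := by unfold Spec_extract_time_range_py; infer_instance

-- ===== CLAIM (what is proved, stated in full; the proofs are below) =====
def Claim_equal_extract_time_range_py : Prop := ∀ (files : List (List (String × String))), Dom_extract_time_range_py files → Spec_extract_time_range_py files (extract_time_range_py files)

-- ===== LEMMAS AND PROOFS =====

-- the timestamps each file contributes, in A's order
def pvEntries (file : List (String × String)) : List String :=
  (pvLookup file "dateFrom").toList ++ (pvLookup file "dateTo").toList

lemma pvA_ts (files : List (List (String × String))) (acc : List String) :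
    files.foldl (fun ts file =>
      let ts := match pvLookup file "dateFrom" with
        | some v => ts ++ [v]
        | none => ts
      match pvLookup file "dateTo" with
        | some v => ts ++ [v]
        | none => ts) acc = acc ++ files.flatMap pvEntries := by
  induction files generalizing acc with
  | nil => simp
  | cons f t ih =>
      simp only [List.foldl_cons, ih, List.flatMap_cons, pvEntries]
      cases hF : pvLookup f "dateFrom" <;> cases hT : pvLookup f "dateTo" <;> simp

lemma pvStep_eq (acc : Option String × Option String) (file : List (String × String)) :
    pvStep acc file = (pvEntries file).foldl pvUpd acc := by
  unfold pvStep pvEntries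
  cases pvLookup file "dateFrom" <;> cases pvLookup file "dateTo" <;> rfl

lemma pvB_fold (files : List (List (String × String))) (acc : Option String × Option String) :
    files.foldl pvStep acc = (files.flatMap pvEntries).foldl pvUpd acc := by
  induction files generalizing acc with
  | nil => rfl
  | cons f t ih => simp [List.foldl_cons, pvStep_eq, ih, List.foldl_append]

lemma pvUpd_some (e l v : String) :
    pvUpd (some e, some l) v = (some (min e v), some (max l v)) := by
  have h1 : (if v < e then some v else some e) = some (min e v) := by
    rcases le_or_gt e v with h | h
    · simp [not_lt.2 h, min_eq_left h]
    · simp [h, min_eq_right h.le]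
  have h2 : (if v > l then some v else some l) = some (max l v) := by
    rcases le_or_gt v l with h | h
    · simp [not_lt.2 h, max_eq_left h]
    · simp [h, max_eq_right h.le]
  show (if v < e then some v else some e, if v > l then some v else some l) = _
  rw [h1, h2]

lemma pvUpd_run (ts : List String) (e l : String) :
    ts.foldl pvUpd (some e, some l) = (some (ts.foldl min e), some (ts.foldl max l)) := by
  induction ts generalizing e l with
  | nil => rfl
  | cons h t ih => simp [List.foldl_cons, pvUpd_some, ih]

lemma pvFold_char (ts : List String) :
    ts.foldl pvUpd (none, none) =
      (PySem.List.min? ts (fun x => x), PySem.List.max? ts (fun x => x)) := by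
  cases ts with
  | nil => rfl
  | cons h t =>
      have : pvUpd (none, none) h = (some h, some h) := rfl
      rw [List.foldl_cons, this, pvUpd_run,
        PySem.List.min?_id_cons, PySem.List.max?_id_cons]

-- ===== VERDICT (by name: the statement is the Claim_ definition above) =====
theorem extract_time_range_py_spec : Claim_equal_extract_time_range_py := by
  intro files _
  unfold Spec_extract_time_range_py extract_time_range_py extract_time_range_py_alt
  rw [pvB_fold, pvFold_char, pvA_ts]
  by_cases hf : files = []
  · subst hf; rfl
  · simp only [hf, List.nil_append]
    by_cases hts : files.flatMap pvEntries = []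
    · simp [hts, PySem.List.min?, PySem.List.max?]
    · simp [hts]
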